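-- pv_equiv track=rewrite | github.com/pypi-data/pypi-mirror-366 | packages/jsongrapher/jsongrapher-5.1.tar.gz/jsongrapher-5.1/JSONGrapher/units_list.py | expand_ids_list
-- ===== SOURCE A (Python) =====
-- metric_prefixes_symbolic = ["Y", "Z", "E", "P", "T", "G", "M", "k", "h", "da", "", "d", "c", "m", "µ", "n", "p", "f", "a", "z", "y"]
--
-- metric_prefixes_symbolic_greater = metric_prefixes_symbolic[0:11] #first 10
--
-- metric_prefixes_symbolic_lesser = metric_prefixes_symbolic[11:]
--
-- def expand_ids_list(ids_list, ids_dict):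
--     """
--     Gives back the expanded names list by generating permutations with metric prefixes.
--     Such as:
--     ["km", "cm", "mm"]
--     """
--     expanded_ids_list = [] #now create the list to add to.
--     for id in ids_list:
--         if "prefix" in ids_dict[id]:
--             if ids_dict[id]["prefix"] == "all":
--                 for metric_prefix_symbolic in metric_prefixes_symbolic:
--                     expanded_ids_list.append(metric_prefix_symbolic+id)
--             elif ids_dict[id]["prefix"] == "-":
--                 expanded_ids_list.append(id) #no prefix
--                 for metric_prefix_symbolic in metric_prefixes_symbolic_lesser:
--                     expanded_ids_list.append(metric_prefix_symbolic+id)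
--             elif ids_dict[id]["prefix"] == "+":
--                 expanded_ids_list.append(id) #no prefix
--                 for metric_prefix_symbolic in metric_prefixes_symbolic_greater:
--                     expanded_ids_list.append(metric_prefix_symbolic+id)
--             else:
--                 expanded_ids_list.append(id) #no prefix
--         else:
--                 expanded_ids_list.append(id) #no prefix
--     return expanded_ids_list
-- ===== SOURCE B (Python) =====
-- metric_prefixes_symbolic = ["Y", "Z", "E", "P", "T", "G", "M", "k", "h", "da", "", "d", "c", "m", "µ", "n", "p", "f", "a", "z", "y"]
--
-- def _expand_one(id, info):
--     """Expansion of a single id given its dict entry: the list of prefix+id strings."""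
--     code = info.get("prefix")
--     if code == "all":
--         prefixes = metric_prefixes_symbolic
--     elif code == "-":
--         prefixes = [""] + metric_prefixes_symbolic[11:]
--     elif code == "+":
--         prefixes = [""] + metric_prefixes_symbolic[:11]
--     else:
--         prefixes = [""]
--     return [p + id for p in prefixes]
--
-- def expand_ids_list(ids_list, ids_dict):
--     # Structural recursion on ids_list: expansion of the head concatenated with
--     # the expansion of the tail (no mutable accumulator).
--     if not ids_list:
--         return []
--     id = ids_list[0]
--     return _expand_one(id, ids_dict[id]) + expand_ids_list(ids_list[1:], ids_dict)
-- ===== Notes on version B (the rewrite author's own statement) =====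
-- stated objective: alternative
-- what changed: Replaces A's single accumulator loop with per-branch append loops by structural recursion on ids_list: a pure helper computes the whole expansion of one id as a list comprehension over its prefix list, and the result is the head's expansion concatenated with the recursive expansion of the tail.
import Mathlib
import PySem

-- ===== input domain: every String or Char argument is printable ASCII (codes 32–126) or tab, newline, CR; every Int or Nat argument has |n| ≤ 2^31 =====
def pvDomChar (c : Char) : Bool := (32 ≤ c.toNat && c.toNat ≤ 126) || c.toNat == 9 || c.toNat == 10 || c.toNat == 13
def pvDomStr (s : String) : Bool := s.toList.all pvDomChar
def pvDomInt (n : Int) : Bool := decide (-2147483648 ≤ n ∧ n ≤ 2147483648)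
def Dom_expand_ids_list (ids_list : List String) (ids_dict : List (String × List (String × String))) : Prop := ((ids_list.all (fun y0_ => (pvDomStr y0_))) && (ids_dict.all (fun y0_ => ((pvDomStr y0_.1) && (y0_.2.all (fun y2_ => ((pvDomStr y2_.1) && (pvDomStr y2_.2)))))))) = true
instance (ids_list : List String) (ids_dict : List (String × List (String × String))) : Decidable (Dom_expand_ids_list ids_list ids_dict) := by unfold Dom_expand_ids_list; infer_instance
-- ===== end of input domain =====

-- B replaces A's accumulator loop with per-branch append loops by structural recursion:
-- a helper computes one id's whole expansion, and the result is head-expansion ++ tail (alternative decomposition).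

-- ===== PORT A =====
def metric_prefixes_symbolic : List String := ["Y", "Z", "E", "P", "T", "G", "M", "k", "h", "da", "", "d", "c", "m", "µ", "n", "p", "f", "a", "z", "y"]
def metric_prefixes_symbolic_greater : List String := PySem.List.slice metric_prefixes_symbolic (some 0) (some 11)
def metric_prefixes_symbolic_lesser : List String := PySem.List.slice metric_prefixes_symbolic (some 11) none

-- A raises KeyError when an id is missing from ids_dict; there the port leaves the
-- accumulator unchanged (unreachable under Pre_).
def expand_ids_list (ids_list : List String) (ids_dict : List (String × List (String × String))) : List String :=
  ids_list.foldl (fun acc id =>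
    match ids_dict.lookup id with
    | none => acc
    | some d =>
      match d.lookup "prefix" with
      | none => acc ++ [id]
      | some p =>
        if p = "all" then
          metric_prefixes_symbolic.foldl (fun a pre => a ++ [pre ++ id]) acc
        else if p = "-" then
          metric_prefixes_symbolic_lesser.foldl (fun a pre => a ++ [pre ++ id]) (acc ++ [id])
        else if p = "+" then
          metric_prefixes_symbolic_greater.foldl (fun a pre => a ++ [pre ++ id]) (acc ++ [id])
        else acc ++ [id]) []

-- ===== PORT B =====
def pv_expand_one (id : String) (info : List (String × String)) : List String :=
  let code := info.lookup "prefix"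
  let prefixes :=
    if code = some "all" then metric_prefixes_symbolic
    else if code = some "-" then "" :: metric_prefixes_symbolic_lesser
    else if code = some "+" then "" :: metric_prefixes_symbolic_greater
    else [""]
  prefixes.map (fun p => p ++ id)

-- on a missing id (KeyError in Python, outside Pre_) the port uses the empty entry
def expand_ids_list_alt (ids_list : List String) (ids_dict : List (String × List (String × String))) : List String :=
  match ids_list with
  | [] => []
  | id :: rest => pv_expand_one id ((ids_dict.lookup id).getD []) ++ expand_ids_list_alt rest ids_dict

-- ===== PRECONDITION & SPEC =====
-- Pre_ excludes exactly the inputs where A raises KeyError: some id not a key of ids_dict.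
def Pre_expand_ids_list (ids_list : List String) (ids_dict : List (String × List (String × String))) : Prop :=
  ∀ id ∈ ids_list, id ∈ ids_dict.map Prod.fst
instance (ids_list : List String) (ids_dict : List (String × List (String × String))) : Decidable (Pre_expand_ids_list ids_list ids_dict) := by unfold Pre_expand_ids_list; infer_instance

def pvWitness_expand_ids_list : List String × (List (String × List (String × String))) :=
  (["m", "s", "V", "x"], [("m", [("prefix", "all")]), ("s", [("prefix", "-")]), ("V", [("prefix", "+")]), ("x", [])])

def Spec_expand_ids_list (ids_list : List String) (ids_dict : List (String × List (String × String))) (out : List String) : Prop := out = expand_ids_list_alt ids_list ids_dict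
instance (ids_list : List String) (ids_dict : List (String × List (String × String))) (out : List String) : Decidable (Spec_expand_ids_list ids_list ids_dict out) := by unfold Spec_expand_ids_list; infer_instance

-- ===== CLAIM (what is proved, stated in full; the proofs are below) =====
def Claim_equal_expand_ids_list : Prop := ∀ (ids_list : List String) (ids_dict : List (String × List (String × String))), Dom_expand_ids_list ids_list ids_dict → Pre_expand_ids_list ids_list ids_dict → Spec_expand_ids_list ids_list ids_dict (expand_ids_list ids_list ids_dict)

-- ===== LEMMAS AND PROOFS =====

theorem pv_flatten_map_singleton {α β : Type} (l : List α) (f : α → β) :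
    (l.map (fun x => [f x])).flatten = l.map f := by
  induction l with
  | nil => rfl
  | cons x xs ih => simp [ih]

theorem pv_lookup_of_mem_fst {α β : Type} [BEq α] [LawfulBEq α] (l : List (α × β)) (k : α)
    (h : k ∈ l.map Prod.fst) : ∃ v, l.lookup k = some v := by
  induction l with
  | nil => simp at h
  | cons p rest ih =>
    by_cases hk : k == p.1
    · exact ⟨p.2, by simp only [List.lookup, hk]⟩
    · have : k ∈ rest.map Prod.fst := by
        simp only [List.map_cons, List.mem_cons] at h
        rcases h with h | h
        · exact absurd (by simp [h]) hk
        · exact h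
      obtain ⟨v, hv⟩ := ih this
      refine ⟨v, ?_⟩
      simp only [List.lookup, Bool.not_eq_true] at hk ⊢
      rw [hk, hv]

-- A's loop body equals "append this id's whole expansion" once the dict lookup succeeds
theorem pv_step_eq (acc : List String) (id : String) (d : List (String × String))
    (ids_dict : List (String × List (String × String))) (h : ids_dict.lookup id = some d) :
    (match ids_dict.lookup id with
     | none => acc
     | some d =>
       match d.lookup "prefix" with
       | none => acc ++ [id]
       | some p =>
         if p = "all" then
           metric_prefixes_symbolic.foldl (fun a pre => a ++ [pre ++ id]) acc
         else if p = "-" then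
           metric_prefixes_symbolic_lesser.foldl (fun a pre => a ++ [pre ++ id]) (acc ++ [id])
         else if p = "+" then
           metric_prefixes_symbolic_greater.foldl (fun a pre => a ++ [pre ++ id]) (acc ++ [id])
         else acc ++ [id]) = acc ++ pv_expand_one id d := by
  rw [h]
  unfold pv_expand_one
  cases hp : d.lookup "prefix" with
  | none => simp [hp]
  | some p =>
    simp only [hp]
    by_cases h1 : p = "all"
    · simp [h1, pv_flatten_map_singleton]
    · by_cases h2 : p = "-"
      · simp [h2, pv_flatten_map_singleton, List.append_assoc]
      · by_cases h3 : p = "+"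
        · simp [h3, pv_flatten_map_singleton, List.append_assoc]
        · simp [h1, h2, h3]

theorem pv_foldl_eq (ids_list : List String) (ids_dict : List (String × List (String × String)))
    (hpre : ∀ id ∈ ids_list, id ∈ ids_dict.map Prod.fst) (acc : List String) :
    ids_list.foldl (fun acc id =>
      match ids_dict.lookup id with
      | none => acc
      | some d =>
        match d.lookup "prefix" with
        | none => acc ++ [id]
        | some p =>
          if p = "all" then
            metric_prefixes_symbolic.foldl (fun a pre => a ++ [pre ++ id]) acc
          else if p = "-" then
            metric_prefixes_symbolic_lesser.foldl (fun a pre => a ++ [pre ++ id]) (acc ++ [id])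
          else if p = "+" then
            metric_prefixes_symbolic_greater.foldl (fun a pre => a ++ [pre ++ id]) (acc ++ [id])
          else acc ++ [id]) acc = acc ++ expand_ids_list_alt ids_list ids_dict := by
  induction ids_list generalizing acc with
  | nil => simp [expand_ids_list_alt]
  | cons x xs ih =>
    have hx : x ∈ ids_dict.map Prod.fst := hpre x (List.mem_cons_self)
    obtain ⟨d, hd⟩ := pv_lookup_of_mem_fst ids_dict x hx
    simp only [List.foldl_cons]
    rw [pv_step_eq acc x d ids_dict hd,
        ih (fun id hid => hpre id (List.mem_cons_of_mem _ hid))]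
    simp [expand_ids_list_alt, hd, List.append_assoc]

-- ===== VERDICT (by name: the statement is the Claim_ definition above) =====
theorem expand_ids_list_spec : Claim_equal_expand_ids_list := by
  intro ids_list ids_dict _ hpre
  unfold Spec_expand_ids_list expand_ids_list
  simpa using pv_foldl_eq ids_list ids_dict hpre []
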